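-- pv_equiv track=rewrite | github.com/sebastianduesing/adp | scripts/age_process.py | normalizeUnit
-- ===== SOURCE A (Python) =====
-- def normalizeUnit(unit, syndict):
--     normalizedUnit = unit
--     for key in syndict.keys():
--         if unit in syndict[key]:
--             normalizedUnit = key
--             break
--         else:
--             pass
--     return normalizedUnit
-- ===== SOURCE B (Python) =====
-- def normalizeUnit(unit, syndict):
--     reverse = {}
--     for key, synonyms in syndict.items():
--         for s in synonyms:
--             if s not in reverse:
--                 reverse[s] = key
--     return reverse.get(unit, unit)
-- ===== Notes on version B (the rewrite author's own statement) =====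
-- stated objective: idiomatic
-- what changed: B builds a reverse synonym->key index once (first key wins) and answers with a single dict lookup with fallback, instead of A's per-key membership scan with an early break.
import Mathlib
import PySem

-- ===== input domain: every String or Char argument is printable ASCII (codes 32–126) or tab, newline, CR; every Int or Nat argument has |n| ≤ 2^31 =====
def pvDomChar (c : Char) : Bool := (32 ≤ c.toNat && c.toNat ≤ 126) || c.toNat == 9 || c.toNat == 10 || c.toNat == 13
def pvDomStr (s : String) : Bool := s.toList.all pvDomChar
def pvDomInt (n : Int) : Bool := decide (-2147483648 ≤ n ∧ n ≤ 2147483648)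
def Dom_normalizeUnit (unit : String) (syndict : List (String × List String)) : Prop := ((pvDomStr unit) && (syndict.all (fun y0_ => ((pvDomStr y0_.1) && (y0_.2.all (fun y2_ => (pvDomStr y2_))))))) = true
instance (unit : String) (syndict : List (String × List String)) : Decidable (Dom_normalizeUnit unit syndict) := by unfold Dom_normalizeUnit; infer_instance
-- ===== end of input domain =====

-- B replaces A's per-key membership scan with a reverse synonym->key index built once (first key wins) and a single lookup with fallback (idiomatic).


-- ===== PORT A =====
-- A: normalizedUnit = unit; for key in syndict.keys(): if unit in syndict[key]: key; break
def normalizeUnitLoopA (unit : String) (d : PySem.Dict String (List String)) : List String → String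
  | [] => unit
  | k :: ks => if unit ∈ d.getD k [] then k else normalizeUnitLoopA unit d ks

def normalizeUnit (unit : String) (syndict : List (String × List String)) : String :=
  let d := PySem.Dict.ofList syndict
  normalizeUnitLoopA unit d d.keys

-- ===== PORT B =====
-- B: reverse index built over syndict.items(), inserting s->key only if s not already present
def buildReverse (items : List (String × List String)) : PySem.Dict String String :=
  items.foldl
    (fun r p => p.2.foldl (fun r s => if r.contains s then r else r.insert s p.1) r)
    PySem.Dict.empty

def normalizeUnit_alt (unit : String) (syndict : List (String × List String)) : String :=
  let d := PySem.Dict.ofList syndict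
  ((buildReverse d.items).get? unit).getD unit

-- ===== PRECONDITION & SPEC =====
def Spec_normalizeUnit (unit : String) (syndict : List (String × List String)) (out : String) : Prop := out = normalizeUnit_alt unit syndict
instance (unit : String) (syndict : List (String × List String)) (out : String) : Decidable (Spec_normalizeUnit unit syndict out) := by unfold Spec_normalizeUnit; infer_instance

-- ===== CLAIM (what is proved, stated in full; the proofs are below) =====
def Claim_equal_normalizeUnit : Prop := ∀ (unit : String) (syndict : List (String × List String)), Dom_normalizeUnit unit syndict → Spec_normalizeUnit unit syndict (normalizeUnit unit syndict)

-- ===== LEMMAS AND PROOFS =====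

-- first key (in item order) one of whose synonyms is u
def firstKey (u : String) (L : List (String × List String)) : Option String :=
  L.findSome? (fun p => if u ∈ p.2 then some p.1 else none)

lemma get?_inner_fold (u k : String) (syns : List String) (r : PySem.Dict String String) :
    (syns.foldl (fun r s => if r.contains s then r else r.insert s k) r).get? u
      = Option.or (r.get? u) (if u ∈ syns then some k else none) := by
  induction syns generalizing r with
  | nil =>
    simp only [List.foldl_nil, List.not_mem_nil, if_false]
    cases r.get? u <;> rfl
  | cons s ss ih =>
    simp only [List.foldl_cons, ih]
    by_cases hc : r.contains s
    · simp only [hc, if_true]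
      by_cases hus : u = s
      · subst hus
        have : (r.get? u).isSome := by
          rw [← PySem.Dict.contains_eq_isSome_get?]; exact hc
        cases hr : r.get? u with
        | none => simp [hr] at this
        | some x => simp [Option.or]
      · simp [List.mem_cons, hus]
    · simp only [hc, Bool.false_eq_true, if_false]
      have hr : r.get? u = none ∨ u ≠ s := by
        by_cases hus : u = s
        · subst hus
          left
          cases hr : r.get? u with
          | none => rfl
          | some x =>
            exfalso; apply hc
            rw [PySem.Dict.contains_eq_isSome_get?, hr]; rfl
        · right; exact hus
      rw [PySem.Dict.get?_insert]
      by_cases hus : u = s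
      · rcases hr with hr | hr
        · subst hus
          simp [hr, Option.or, List.mem_cons]
        · exact absurd hus hr
      · simp [hus, List.mem_cons]

lemma get?_buildReverse_fold (u : String) (L : List (String × List String))
    (r : PySem.Dict String String) :
    (L.foldl (fun r p => p.2.foldl (fun r s => if r.contains s then r else r.insert s p.1) r) r).get? u
      = Option.or (r.get? u) (firstKey u L) := by
  induction L generalizing r with
  | nil =>
    simp only [List.foldl_nil, firstKey, List.findSome?_nil]
    cases r.get? u <;> rfl
  | cons p L ih =>
    simp only [List.foldl_cons, ih, get?_inner_fold, firstKey, List.findSome?_cons]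
    by_cases h : u ∈ p.2
    · simp [h, Option.or]
      cases r.get? u <;> rfl
    · simp [h]

lemma loopA_eq_firstKey (u : String) (d : PySem.Dict String (List String))
    (L : List (String × List String)) (h : ∀ p ∈ L, d.getD p.1 [] = p.2) :
    normalizeUnitLoopA u d (L.map (·.1)) = (firstKey u L).getD u := by
  induction L with
  | nil => simp [normalizeUnitLoopA, firstKey]
  | cons p L ih =>
    have hp : d.getD p.1 [] = p.2 := h p (List.mem_cons_self ..)
    have hrest : ∀ q ∈ L, d.getD q.1 [] = q.2 := fun q hq => h q (List.mem_cons_of_mem _ hq)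
    simp only [List.map_cons, normalizeUnitLoopA, hp, firstKey, List.findSome?_cons]
    by_cases hm : u ∈ p.2
    · simp [hm]
    · simp [hm, ih hrest, firstKey]

lemma main_eq (u : String) (d : PySem.Dict String (List String)) (hnd : d.keys.Nodup) :
    normalizeUnitLoopA u d d.keys = ((buildReverse d.items).get? u).getD u := by
  have hkeys : d.keys = d.items.map (·.1) := rfl
  have hget : ∀ p ∈ d.items, d.getD p.1 [] = p.2 := by
    intro p hp
    exact PySem.Dict.getD_of_mem_items d (k := p.1) (v := p.2) (by simpa using hp) hnd []
  rw [hkeys, loopA_eq_firstKey u d d.items hget]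
  unfold buildReverse
  rw [get?_buildReverse_fold]
  simp [Option.or]

-- ===== VERDICT (by name: the statement is the Claim_ definition above) =====
theorem normalizeUnit_spec : Claim_equal_normalizeUnit := by
  intro unit syndict _
  show normalizeUnitLoopA unit (PySem.Dict.ofList syndict) (PySem.Dict.ofList syndict).keys
      = ((buildReverse (PySem.Dict.ofList syndict).items).get? unit).getD unit
  exact main_eq unit _ (PySem.Dict.nodup_keys_ofList syndict)
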